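-- pv_equiv track=rewrite | github.com/09143014/minimax_queueing_experiments | src/adversarial_queueing/algorithms/amq.py | _bounded_routing_states
-- ===== SOURCE A (Python) =====
-- def _bounded_routing_states(num_queues: int, max_queue_length: int) -> tuple[tuple[int, ...], ...]:
--     if max_queue_length < 0:
--         raise ValueError("max_queue_length must be nonnegative")
--     states = [()]
--     for _ in range(num_queues):
--         states = [
--             (*prefix, value)
--             for prefix in states
--             for value in range(max_queue_length + 1)
--         ]
--     return tuple(states)
-- ===== SOURCE B (Python) =====
-- def _bounded_routing_states(num_queues: int, max_queue_length: int) -> tuple[tuple[int, ...], ...]: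
--     if max_queue_length < 0:
--         raise ValueError("max_queue_length must be nonnegative")
--     base = max_queue_length + 1
--     weights = []
--     total = 1
--     for _ in range(num_queues):
--         weights.append(total)
--         total *= base
--     msb_first = list(reversed(weights))
--     return tuple(
--         tuple((i // w) % base for w in msb_first)
--         for i in range(total)
--     )
-- ===== Notes on version B (the rewrite author's own statement) =====
-- stated objective: alternative
-- what changed: Replaces the repeated prefix-product list growth (rebuilding the whole state list num_queues times) by mixed-radix integer decoding: one pass computes the digit weights, then each state is decoded directly from its index i as ((i // base**(n-1-j)) % base).
import Mathlib
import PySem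

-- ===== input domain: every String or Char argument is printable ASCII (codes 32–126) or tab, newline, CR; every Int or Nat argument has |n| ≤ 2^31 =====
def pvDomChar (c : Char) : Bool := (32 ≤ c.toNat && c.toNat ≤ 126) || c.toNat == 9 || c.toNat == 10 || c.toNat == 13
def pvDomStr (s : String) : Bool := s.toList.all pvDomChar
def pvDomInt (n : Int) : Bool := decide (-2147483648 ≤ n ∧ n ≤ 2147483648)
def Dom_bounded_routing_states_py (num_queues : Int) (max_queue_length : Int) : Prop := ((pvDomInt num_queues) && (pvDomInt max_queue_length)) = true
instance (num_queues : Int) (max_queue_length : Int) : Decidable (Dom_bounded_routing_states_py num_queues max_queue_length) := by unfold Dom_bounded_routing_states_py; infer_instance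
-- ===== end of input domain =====

-- B enumerates the same states by mixed-radix decoding of the index instead of repeatedly
-- rebuilding a list of grown pfxes (objective: alternative algorithm, same cost).

-- ===== PORT A =====
-- A's ValueError guard (max_queue_length < 0) is excluded by Pre_ below.
def bounded_routing_states_py (num_queues : Int) (max_queue_length : Int) : List (List Int) :=
  (PySem.List.pyRange 0 num_queues 1).foldl
    (fun states _ =>
      states.flatMap (fun pfx =>
        (PySem.List.pyRange 0 (max_queue_length + 1) 1).map (fun value => pfx ++ [value])))
    [[]]

-- ===== PORT B =====
def bounded_routing_states_py_alt (num_queues : Int) (max_queue_length : Int) : List (List Int) :=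
  let base := max_queue_length + 1
  let wt := (PySem.List.pyRange 0 num_queues 1).foldl
    (fun (p : List Int × Int) _ => (p.1 ++ [p.2], p.2 * base)) ([], 1)
  let msb_first := wt.1.reverse
  (PySem.List.pyRange 0 wt.2 1).map
    (fun i => msb_first.map (fun w => PySem.Int.mod (PySem.Int.floordiv i w) base))

-- ===== PRECONDITION & SPEC =====
-- Pre_ excludes exactly max_queue_length < 0, where A raises ValueError.
def Pre_bounded_routing_states_py (num_queues : Int) (max_queue_length : Int) : Prop :=
  0 ≤ max_queue_length
instance (num_queues : Int) (max_queue_length : Int) : Decidable (Pre_bounded_routing_states_py num_queues max_queue_length) := by unfold Pre_bounded_routing_states_py; infer_instance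
def pvWitness_bounded_routing_states_py : Int × Int := (2, 1)

def Spec_bounded_routing_states_py (num_queues : Int) (max_queue_length : Int) (out : List (List Int)) : Prop := out = bounded_routing_states_py_alt num_queues max_queue_length
instance (num_queues : Int) (max_queue_length : Int) (out : List (List Int)) : Decidable (Spec_bounded_routing_states_py num_queues max_queue_length out) := by unfold Spec_bounded_routing_states_py; infer_instance

-- ===== CLAIM (what is proved, stated in full; the proofs are below) =====
def Claim_equal_bounded_routing_states_py : Prop := ∀ (num_queues : Int) (max_queue_length : Int), Dom_bounded_routing_states_py num_queues max_queue_length → Pre_bounded_routing_states_py num_queues max_queue_length → Spec_bounded_routing_states_py num_queues max_queue_length (bounded_routing_states_py num_queues max_queue_length)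

-- ===== LEMMAS AND PROOFS =====

-- one round of A's loop, over Nat base
def pvStep (b : Nat) (states : List (List Int)) : List (List Int) :=
  states.flatMap (fun p => (List.range b).map (fun v : Nat => p ++ [(v : Int)]))

-- reference enumeration
def pvEnum (b : Nat) : Nat → List (List Int)
  | 0 => [[]]
  | k+1 => pvStep b (pvEnum b k)

-- B's decode of index i into k digits, most significant first
def pvDecode (b k i : Nat) : List Int :=
  (List.range k).reverse.map (fun j => ((i / b ^ j % b : Nat) : Int))

theorem pv_foldl_ignore {α β : Type} (f : α → α) (init : α) (l : List β) :
    l.foldl (fun s _ => f s) init = f^[l.length] init := by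
  induction l generalizing init with
  | nil => rfl
  | cons x xs ih => simp [List.foldl, ih, Function.iterate_succ_apply]

theorem pv_iterate_enum (b : Nat) (k : Nat) : (pvStep b)^[k] [[]] = pvEnum b k := by
  induction k with
  | zero => rfl
  | succ k ih => rw [Function.iterate_succ_apply', ih]; rfl

theorem pv_range_mul_flat (a b : Nat) :
    List.range (a * b) = (List.range a).flatMap (fun q => (List.range b).map (fun r => q * b + r)) := by
  induction a with
  | zero => simp
  | succ a ih =>
    rw [Nat.succ_mul, List.range_add, ih, List.range_succ, List.flatMap_append]
    simp

theorem pv_decode_succ (b k i : Nat) :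
    pvDecode b (k+1) i = pvDecode b k (i / b) ++ [((i % b : Nat) : Int)] := by
  unfold pvDecode
  rw [List.range_succ_eq_map, List.reverse_cons, List.map_append, ← List.map_reverse,
    List.map_map]
  congr 1
  · apply List.map_congr_left
    intro j _
    simp only [Function.comp_apply]
    rw [Nat.div_div_eq_div_mul, ← pow_succ']
  · simp

theorem pv_main (b : Nat) (hb : 0 < b) (k : Nat) :
    (List.range (b ^ k)).map (pvDecode b k) = pvEnum b k := by
  induction k with
  | zero => simp [pvDecode, pvEnum]
  | succ k ih =>
    rw [pow_succ, pv_range_mul_flat, List.map_flatMap, pvEnum, pvStep, ← ih,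
      List.flatMap_map]
    apply List.flatMap_congr
    intro q _
    rw [List.map_map]
    apply List.map_congr_left
    intro r hr
    have hr' : r < b := List.mem_range.mp hr
    simp only [Function.comp_apply]
    have h1 : (q * b + r) / b = q := by
      rw [Nat.mul_comm, Nat.mul_add_div hb, Nat.div_eq_of_lt hr', Nat.add_zero]
    have h2 : (q * b + r) % b = r := by
      rw [Nat.mul_add_mod', Nat.mod_eq_of_lt hr']
    rw [pv_decode_succ, h1, h2]

theorem pv_weights (b : Int) (k : Nat) :
    (fun (p : List Int × Int) => (p.1 ++ [p.2], p.2 * b))^[k] ([], 1) =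
      ((List.range k).map (fun j => b ^ j), b ^ k) := by
  induction k with
  | zero => simp
  | succ k ih =>
    rw [Function.iterate_succ_apply', ih, List.range_succ]
    simp [pow_succ]

theorem pv_portA_eq (n m : Int) :
    bounded_routing_states_py n m = pvEnum (m + 1).toNat n.toNat := by
  unfold bounded_routing_states_py
  rw [pv_foldl_ignore, PySem.List.length_pyRange_one, Int.sub_zero, ← pv_iterate_enum]
  congr 1
  funext states
  unfold pvStep
  congr 1
  funext p
  rw [PySem.List.pyRange_one, Int.sub_zero, List.map_map]
  apply List.map_congr_left
  intro v _
  simp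

theorem pv_cast_digit (bN : Nat) (i j : Nat) :
    PySem.Int.mod (PySem.Int.floordiv (i : Int) ((bN : Int) ^ j)) (bN : Int)
      = ((i / bN ^ j % bN : Nat) : Int) := by
  rw [show ((bN : Int) ^ j) = ((bN ^ j : Nat) : Int) by push_cast; ring]
  rw [PySem.Int.floordiv_natCast, PySem.Int.mod_natCast]

theorem pv_portB_eq (n m : Int) (hm : 0 ≤ m) :
    bounded_routing_states_py_alt n m = pvEnum (m + 1).toNat n.toNat := by
  have hbcast : (((m + 1).toNat : Int)) = m + 1 := by omega
  have hb : 0 < (m + 1).toNat := by omega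
  show (PySem.List.pyRange 0
      (((PySem.List.pyRange 0 n 1).foldl
        (fun (p : List Int × Int) _ => (p.1 ++ [p.2], p.2 * (m+1))) ([], 1)).2) 1).map
    (fun i => ((((PySem.List.pyRange 0 n 1).foldl
        (fun (p : List Int × Int) _ => (p.1 ++ [p.2], p.2 * (m+1))) ([], 1)).1).reverse).map
      (fun w => PySem.Int.mod (PySem.Int.floordiv i w) (m+1)))
    = pvEnum (m + 1).toNat n.toNat
  rw [pv_foldl_ignore (fun (p : List Int × Int) => (p.1 ++ [p.2], p.2 * (m+1))) ([], 1),
    PySem.List.length_pyRange_one, Int.sub_zero, pv_weights, ← pv_main (m + 1).toNat hb n.toNat,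
    ← hbcast]
  rw [show ((((m + 1).toNat : Int)) ^ n.toNat) = (((m + 1).toNat ^ n.toNat : Nat) : Int) by
    push_cast; ring]
  rw [PySem.List.pyRange_one, Int.sub_zero, Int.toNat_natCast, List.map_map]
  apply List.map_congr_left
  intro i _
  simp only [Function.comp_apply, zero_add]
  rw [← List.map_reverse, List.map_map]
  unfold pvDecode
  apply List.map_congr_left
  intro j _
  simp only [Function.comp_apply]
  exact pv_cast_digit (m + 1).toNat i j

-- ===== VERDICT (by name: the statement is the Claim_ definition above) =====
theorem bounded_routing_states_py_spec : Claim_equal_bounded_routing_states_py := by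
  intro n m _ hpre
  unfold Spec_bounded_routing_states_py
  rw [pv_portA_eq n m, pv_portB_eq n m hpre]
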